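-- pv_equiv track=rewrite | github.com/pettma/Advent_of_Code_22 | Day_3/Day_3_part_2.py | finn_felles
-- ===== SOURCE A (Python) =====
-- def finn_felles(a, b):
--     felles_bokst = []
--     plass = 0
--
--     for i in range(0,len(a)):
--         for j in range(0,len(b)):
--             if a[i] == b[j]:
--                 felles_bokst.append(a[i])
--                 plass = j
--     felles_bokst = felles_bokst[0]
--     return felles_bokst, plass
-- ===== SOURCE B (Python) =====
-- def finn_felles(a, b):
--     common = [c for c in a if c in b]
--     first = common[0]
--     return first, b.rfind(common[-1])
-- ===== Notes on version B (the rewrite author's own statement) =====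
-- stated objective: simpler
-- what changed: Replaces the nested index loops with interleaved (chars, plass) state by a single filter of a's chars common to b, taking its first element and b.rfind of its last element.
import Mathlib
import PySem

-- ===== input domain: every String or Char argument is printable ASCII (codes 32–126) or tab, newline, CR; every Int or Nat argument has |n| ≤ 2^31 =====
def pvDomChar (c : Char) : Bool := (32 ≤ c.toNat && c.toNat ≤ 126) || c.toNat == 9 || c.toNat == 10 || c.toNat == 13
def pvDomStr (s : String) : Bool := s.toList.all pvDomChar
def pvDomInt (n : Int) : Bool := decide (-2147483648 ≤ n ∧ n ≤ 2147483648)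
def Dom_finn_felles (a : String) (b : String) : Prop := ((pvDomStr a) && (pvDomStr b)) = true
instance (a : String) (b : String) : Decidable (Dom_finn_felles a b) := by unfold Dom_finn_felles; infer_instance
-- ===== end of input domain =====

-- B replaces A's nested index loops by filter + first/last + b.rfind; objective: simpler.
-- A raises IndexError (felles_bokst[0]) when a and b share no character; Pre_ excludes exactly those inputs.

-- ===== PORT A =====
def finn_felles (a : String) (b : String) : String × Int :=
  let al := a.toList
  let bl := b.toList
  let st := (PySem.List.pyRange 0 (PySem.List.len al)).foldl (fun st i =>
    (PySem.List.pyRange 0 (PySem.List.len bl)).foldl (fun st2 j =>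
      if PySem.List.pyGetD al i ' ' = PySem.List.pyGetD bl j ' ' then
        (st2.1 ++ [PySem.List.pyGetD al i ' '], j)
      else st2) st) (([] : List Char), (0 : Int))
  -- felles_bokst[0]: raises IndexError when the list is empty; Pre_ guarantees it is not
  (String.ofList (st.1.take 1), st.2)

-- ===== PORT B =====
def finn_felles_alt (a : String) (b : String) : String × Int :=
  let common := a.toList.filter (fun c => b.toList.contains c)
  match common with
  | [] => ("", 0)   -- Python B raises IndexError here (common[0]); outside Pre_
  | c :: rest => (String.ofList [c],
      PySem.Chars.rfind b.toList [(c :: rest).getLast (List.cons_ne_nil c rest)])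

-- ===== PRECONDITION & SPEC =====
-- Pre_ excludes exactly the inputs where a and b share no character: there A raises IndexError.
def Pre_finn_felles (a : String) (b : String) : Prop :=
  (a.toList.any (fun c => b.toList.contains c)) = true
instance (a : String) (b : String) : Decidable (Pre_finn_felles a b) := by
  unfold Pre_finn_felles; infer_instance
def pvWitness_finn_felles : String × String := ("ab", "bc")

def Spec_finn_felles (a : String) (b : String) (out : String × Int) : Prop := out = finn_felles_alt a b
instance (a : String) (b : String) (out : String × Int) : Decidable (Spec_finn_felles a b out) := by unfold Spec_finn_felles; infer_instance

-- ===== CLAIM (what is proved, stated in full; the proofs are below) =====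
def Claim_equal_finn_felles : Prop := ∀ (a : String) (b : String), Dom_finn_felles a b → Pre_finn_felles a b → Spec_finn_felles a b (finn_felles a b)

-- ===== LEMMAS AND PROOFS =====

theorem pv_single_prefix (c : Char) (l : List Char) :
    [c].isPrefixOf l = decide (l.head? = some c) := by
  cases l with
  | nil => simp [List.isPrefixOf]
  | cons x xs =>
    show (c == x && List.isPrefixOf [] xs) = _
    simp only [List.isPrefixOf, Bool.and_true, List.head?_cons, Option.some.injEq]
    cases h : (c == x) with
    | true =>
      have : c = x := eq_of_beq h
      simp [this]
    | false =>
      have : ¬ (x = c) := fun h' => by simp [h'] at h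
      simp [this]

theorem pv_find?_congr_mem {α : Type} (l : List α) (p q : α → Bool)
    (h : ∀ x ∈ l, p x = q x) : l.find? p = l.find? q := by
  induction l with
  | nil => rfl
  | cons x xs ih =>
    have hx := h x (by simp)
    simp only [List.find?]
    rw [hx, ih (fun y hy => h y (by simp [hy]))]

theorem pv_lastwrite {α β : Type} (l : List α) (q : α → Bool) (g : α → β) (init : β) :
    l.foldl (fun p e => if q e then g e else p) init
      = ((l.reverse.find? q).map g).getD init := by
  induction l using List.reverseRecOn with
  | nil => rfl
  | append_singleton xs x ih =>
    rw [List.foldl_append, List.reverse_append]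
    simp only [List.foldl_cons, List.foldl_nil, List.reverse_singleton, List.singleton_append,
      List.find?]
    cases hq : q x with
    | true => simp
    | false => simp [ih]

theorem pv_revfind_eq_filter_getLast? {α : Type} (l : List α) (p : α → Bool) :
    l.reverse.find? p = (l.filter p).getLast? := by
  induction l using List.reverseRecOn with
  | nil => rfl
  | append_singleton xs x ih =>
    rw [List.reverse_append, List.filter_append]
    simp only [List.reverse_singleton, List.singleton_append, List.find?,
      List.filter_cons, List.filter_nil]
    cases hp : p x with
    | true => simp
    | false =>
      rw [ih]
      simp

theorem pv_go_eq (s : List Char) (c : Char) (n : Nat) :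
    PySem.Chars.rfind.go s [c] n
      = (((List.range (n+1)).reverse.find? (fun j => decide (s[j]? = some c))).map
          (fun j => (j : Int))).getD (-1) := by
  induction n with
  | zero =>
    rw [PySem.Chars.rfind.go]
    simp only [pv_single_prefix, List.head?_eq_getElem?]
    simp only [List.range_succ, List.range_zero, List.nil_append, List.reverse_singleton,
      List.find?]
    cases hp : decide (s[0]? = some c) with
    | true => simp
    | false => simp
  | succ j ih =>
    rw [PySem.Chars.rfind.go]
    rw [List.range_succ, List.reverse_append]
    simp only [List.reverse_singleton, List.singleton_append, List.find?]
    rw [pv_single_prefix, List.head?_drop]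
    cases hp : decide (s[j+1]? = some c) with
    | true => simp
    | false => simp [ih]

def pvLastIdx (bl : List Char) (c : Char) : Option Nat :=
  (List.range bl.length).reverse.find? (fun j => decide (bl[j]? = some c))

theorem pv_rfind_char (bl : List Char) (c : Char) :
    PySem.Chars.rfind bl [c]
      = ((pvLastIdx bl c).map (fun j => (j : Int))).getD (-1) := by
  show PySem.Chars.rfind.go bl [c] bl.length = _
  rw [pv_go_eq]
  rw [List.range_succ, List.reverse_append]
  simp only [List.reverse_singleton, List.singleton_append, List.find?]
  simp [pvLastIdx]

theorem pv_lastIdx_isSome (bl : List Char) (c : Char) :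
    (pvLastIdx bl c).isSome = true ↔ c ∈ bl := by
  unfold pvLastIdx
  rw [List.find?_isSome]
  constructor
  · rintro ⟨j, _, hj⟩
    simp only [decide_eq_true_eq] at hj
    exact List.mem_iff_getElem?.mpr ⟨j, hj⟩
  · intro hc
    obtain ⟨j, hj⟩ := List.mem_iff_getElem?.mp hc
    have hlt : j < bl.length := (List.getElem?_eq_some_iff.mp hj).1
    exact ⟨j, by simp [List.mem_range, hlt], by simp [hj]⟩

-- the "last matching (index, char)" pair seen by A's inner loop
def pvLast (bl : List Char) (c : Char) : Option (Int × Char) :=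
  (PySem.List.enumerate bl).reverse.find? (fun e => decide (c = e.2))

theorem pv_pvLast_eq (bl : List Char) (c : Char) :
    pvLast bl c = (pvLastIdx bl c).map (fun j => ((j : Int), c)) := by
  unfold pvLast pvLastIdx
  rw [PySem.List.enumerate_eq_map_pyRange bl ' ']
  rw [show PySem.List.len bl = ((bl.length : Nat) : Int) from rfl]
  rw [PySem.List.pyRange_zero_natCast, List.map_map, ← List.map_reverse, List.find?_map]
  have hc : ∀ j ∈ (List.range bl.length).reverse,
      ((fun e => decide (c = e.2)) ∘ ((fun j => (j, PySem.List.pyGetD bl j ' ')) ∘ fun (k : Nat) => ((k : Int)))) j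
        = (fun j => decide (bl[j]? = some c)) j := by
    intro j hj
    have hlt : j < bl.length := List.mem_range.mp (List.mem_reverse.mp hj)
    simp only [Function.comp, PySem.List.pyGetD_natCast]
    rw [List.getD_eq_getElem _ _ hlt, List.getElem?_eq_getElem hlt]
    simp [eq_comm]
  rw [pv_find?_congr_mem _ _ _ hc]
  cases h : (List.range bl.length).reverse.find? (fun j => decide (bl[j]? = some c)) with
  | none => simp
  | some j =>
    have hj := List.find?_some h
    simp only [decide_eq_true_eq] at hj
    have h2 := List.getElem?_eq_some_iff.mp hj
    obtain ⟨hlt, hv⟩ := h2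
    simp only [Option.map_some, Function.comp, PySem.List.pyGetD_natCast]
    rw [List.getD_eq_getElem _ _ hlt, hv]
    rfl

-- value A's plass takes after scanning b for char c, starting from p
def pvPlass (bl : List Char) (c : Char) (p : Int) : Int :=
  ((pvLast bl c).map (fun e => e.1)).getD p

def pvPiece (bl : List Char) (c : Char) : List Char :=
  ((PySem.List.enumerate bl).filter (fun e => decide (c = e.2))).map (fun _ => c)

theorem pv_lastwrite' {α β : Type} (l : List α) (q : α → Prop) [DecidablePred q] (g : α → β)
    (init : β) :
    l.foldl (fun p e => if q e then g e else p) init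
      = (((l.reverse.find? (fun e => decide (q e))).map g).getD init) := by
  rw [PySem.List.foldl_congr_mem l _ (fun p e => if decide (q e) then g e else p) init
    (by intro p e _; by_cases h : q e <;> simp [h])]
  exact pv_lastwrite l (fun e => decide (q e)) g init

theorem pv_inner (bl : List Char) (c : Char) (st : List Char × Int) :
    (PySem.List.pyRange 0 (PySem.List.len bl)).foldl (fun st2 j =>
        if c = PySem.List.pyGetD bl j ' ' then (st2.1 ++ [c], j) else st2) st
      = (st.1 ++ pvPiece bl c, pvPlass bl c st.2) := by
  have h1 : (PySem.List.pyRange 0 (PySem.List.len bl)).foldl (fun st2 j =>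
        if c = PySem.List.pyGetD bl j ' ' then (st2.1 ++ [c], j) else st2) st
      = (PySem.List.enumerate bl).foldl (fun st2 e =>
        if c = e.2 then (st2.1 ++ [c], e.1) else st2) st := by
    rw [PySem.List.enumerate_eq_map_pyRange bl ' ', List.foldl_map]
  rw [h1]
  rw [PySem.List.foldl_congr_mem _ _ (fun st2 (e : Int × Char) =>
      ((fun s1 (e : Int × Char) => if c = e.2 then s1 ++ [c] else s1) st2.1 e,
       (fun s2 (e : Int × Char) => if c = e.2 then e.1 else s2) st2.2 e)) st
    (by intro acc e _; by_cases h : c = e.2 <;> simp [h])]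
  rw [show st = (st.1, st.2) from rfl,
    PySem.List.foldl_prod_mk (f := fun s1 (e : Int × Char) => if c = e.2 then s1 ++ [c] else s1)
      (g := fun s2 (e : Int × Char) => if c = e.2 then e.1 else s2)]
  refine Prod.ext ?_ ?_
  · rw [PySem.List.foldl_append_ite (fun (e : Int × Char) => c = e.2) (fun _ => c)]
    rfl
  · rw [pv_lastwrite' _ (fun (e : Int × Char) => c = e.2) (fun e => e.1) st.2]
    rfl

theorem pv_piece_repl (bl : List Char) (c : Char) :
    pvPiece bl c = List.replicate (bl.count c) c := by
  unfold pvPiece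
  rw [List.map_const']
  congr 1
  rw [Eq.symm List.countP_eq_length_filter]
  have : List.countP (fun x => decide (c = x)) bl = bl.count c := by
    rw [List.count_eq_countP]
    refine List.countP_congr (fun x _ => ?_)
    by_cases h : c = x
    · subst h; simp
    · have h2 : ¬ (x = c) := fun hx => h hx.symm
      simp [h, h2]
  rw [← this]
  conv_rhs => rw [← PySem.List.map_snd_enumerate bl 0]
  rw [List.countP_map]
  rfl

def pvG (bl : List Char) (c : Char) : Int := ((pvLast bl c).map (fun e => e.1)).getD 0

theorem pv_plass_ite (bl : List Char) (c : Char) (p : Int) :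
    pvPlass bl c p = if c ∈ bl then pvG bl c else p := by
  unfold pvPlass pvG
  by_cases h : c ∈ bl
  · rw [if_pos h]
    have hs := (pv_lastIdx_isSome bl c).mpr h
    rw [pv_pvLast_eq] at *
    cases hx : pvLastIdx bl c with
    | none => rw [hx] at hs; simp at hs
    | some j => simp
  · rw [if_neg h]
    have hs : ¬ (pvLastIdx bl c).isSome = true := fun hh => h ((pv_lastIdx_isSome bl c).mp hh)
    rw [pv_pvLast_eq]
    cases hx : pvLastIdx bl c with
    | none => simp
    | some j => rw [hx] at hs; simp at hs

theorem pv_G_rfind (bl : List Char) (c : Char) (h : c ∈ bl) :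
    pvG bl c = PySem.Chars.rfind bl [c] := by
  unfold pvG
  rw [pv_rfind_char, pv_pvLast_eq]
  have hs := (pv_lastIdx_isSome bl c).mpr h
  cases hx : pvLastIdx bl c with
  | none => rw [hx] at hs; simp at hs
  | some j => simp

theorem pv_head (al bl : List Char) :
    (al.flatMap (pvPiece bl)).head? = (al.filter (fun c => decide (c ∈ bl))).head? := by
  induction al with
  | nil => rfl
  | cons x t ih =>
    rw [List.flatMap_cons, List.filter_cons, pv_piece_repl]
    by_cases h : x ∈ bl
    · have hc : 0 < bl.count x := List.count_pos_iff.mpr h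
      cases hcnt : bl.count x with
      | zero => omega
      | succ n => simp [List.replicate_succ, h]
    · have hc : bl.count x = 0 := by
        simp [List.count_eq_zero, h]
      simp [hc, h, ih]

theorem pv_A_closed (a b : String) :
    finn_felles a b
      = (String.ofList ((a.toList.flatMap (pvPiece b.toList)).take 1),
         (((a.toList.filter (fun c => decide (c ∈ b.toList))).getLast?).map
            (pvG b.toList)).getD 0) := by
  unfold finn_felles
  dsimp only
  rw [PySem.List.foldl_congr_mem _ _ (fun st (i : Int) =>
      (st.1 ++ pvPiece b.toList (PySem.List.pyGetD a.toList i ' '),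
       pvPlass b.toList (PySem.List.pyGetD a.toList i ' ') st.2)) _
    (by intro st i _; exact pv_inner b.toList (PySem.List.pyGetD a.toList i ' ') st)]
  rw [PySem.List.foldl_pyRange_zero_pyGetD a.toList ' '
      (fun st c => (st.1 ++ pvPiece b.toList c, pvPlass b.toList c st.2)) (([], 0))]
  rw [PySem.List.foldl_prod_mk (f := fun s1 c => s1 ++ pvPiece b.toList c)
      (g := fun s2 c => pvPlass b.toList c s2)]
  refine Prod.ext ?_ ?_
  · rw [PySem.List.foldl_append_eq_flatMap]
    simp
  · show a.toList.foldl (fun s2 c => pvPlass b.toList c s2) 0 = _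
    rw [PySem.List.foldl_congr_mem _ _ (fun p c => if c ∈ b.toList then pvG b.toList c else p) 0
      (by intro p c _; exact pv_plass_ite b.toList c p)]
    rw [pv_lastwrite' a.toList (fun c => c ∈ b.toList) (pvG b.toList) 0]
    rw [pv_revfind_eq_filter_getLast?]

theorem finn_felles_main (a b : String) (hp : Pre_finn_felles a b) :
    finn_felles a b = finn_felles_alt a b := by
  rw [pv_A_closed]
  unfold finn_felles_alt
  dsimp only
  have hfil : a.toList.filter (fun c => b.toList.contains c)
      = a.toList.filter (fun c => decide (c ∈ b.toList)) := by
    apply List.filter_congr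
    intro x _
    rw [List.contains_eq_mem]
  cases hcm : a.toList.filter (fun c => b.toList.contains c) with
  | nil =>
    exfalso
    unfold Pre_finn_felles at hp
    obtain ⟨c, hc, hcb⟩ := List.any_eq_true.mp hp
    have : c ∈ a.toList.filter (fun c => b.toList.contains c) :=
      List.mem_filter.mpr ⟨hc, hcb⟩
    rw [hcm] at this
    simp at this
  | cons c rest =>
    have hfil' : a.toList.filter (fun c => decide (c ∈ b.toList)) = c :: rest := by
      rw [← hfil, hcm]
    refine Prod.ext ?_ ?_
    · -- first component
      have hh : (a.toList.flatMap (pvPiece b.toList)).head? = some c := by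
        rw [pv_head, hfil', List.head?_cons]
      obtain ⟨t, ht⟩ := List.head?_eq_some_iff.mp hh
      rw [ht]
      rfl
    · -- second component
      have hlast : (a.toList.filter (fun c => decide (c ∈ b.toList))).getLast?
          = some ((c :: rest).getLast (List.cons_ne_nil c rest)) := by
        rw [hfil']
        exact List.getLast?_eq_some_getLast _
      rw [hlast]
      simp only [Option.map_some, Option.getD_some]
      apply pv_G_rfind
      have hmem : (c :: rest).getLast (List.cons_ne_nil c rest) ∈ c :: rest :=
        List.getLast_mem _
      have hmem2 : (c :: rest).getLast (List.cons_ne_nil c rest)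
          ∈ a.toList.filter (fun c => decide (c ∈ b.toList)) := by rw [hfil']; exact hmem
      have := List.mem_filter.mp hmem2
      simpa using this.2

-- ===== VERDICT (by name: the statement is the Claim_ definition above) =====
theorem finn_felles_spec : Claim_equal_finn_felles := by
  intro a b _ hp
  unfold Spec_finn_felles
  exact finn_felles_main a b hp
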